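-- pv_equiv track=rewrite | github.com/epilectrik/voynich | analysis/crypto/syllabic_cipher.py | extract_voynich_chars
-- ===== SOURCE A (Python) =====
-- from typing import Dict, List, Tuple, Set
--
-- def extract_voynich_chars(text: str) -> List[str]:
--     """
--     Extract individual Voynich characters from EVA transcription.
--
--     EVA uses multi-letter combinations for single glyphs:
--     - Single letters: a, c, d, e, f, g, h, i, k, l, m, n, o, p, q, r, s, t, y
--     - Digraphs: ch, sh, ck, cf, ct, etc.
--     """
--     chars = []
--     i = 0
--
--     # Known EVA digraphs (two letters = one glyph)
--     digraphs = {'ch', 'sh', 'ck', 'cf', 'ct', 'cs', 'ai', 'ee', 'ii', 'in'}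
--
--     while i < len(text):
--         if i + 1 < len(text) and text[i:i+2] in digraphs:
--             chars.append(text[i:i+2])
--             i += 2
--         else:
--             chars.append(text[i])
--             i += 1
--
--     return chars
-- ===== SOURCE B (Python) =====
-- import re
--
-- # Digraphs first, then a single-any-character fallback; re.findall's greedy
-- # left-to-right scan prefers the 2-char digraph at each position, exactly as
-- # the manual index loop does.
-- _GLYPH = re.compile(r'ch|sh|ck|cf|ct|cs|ai|ee|ii|in|[\s\S]')
--
-- def extract_voynich_chars(text: str):
--     return _GLYPH.findall(text)
-- ===== Notes on version B (the rewrite author's own statement) =====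
-- stated objective: idiomatic
-- what changed: Replaces the manual index/while loop with set membership on slices by a precompiled regex tokenizer (digraph alternation plus a single-any-character fallback) driven by re.findall.
import Mathlib
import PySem

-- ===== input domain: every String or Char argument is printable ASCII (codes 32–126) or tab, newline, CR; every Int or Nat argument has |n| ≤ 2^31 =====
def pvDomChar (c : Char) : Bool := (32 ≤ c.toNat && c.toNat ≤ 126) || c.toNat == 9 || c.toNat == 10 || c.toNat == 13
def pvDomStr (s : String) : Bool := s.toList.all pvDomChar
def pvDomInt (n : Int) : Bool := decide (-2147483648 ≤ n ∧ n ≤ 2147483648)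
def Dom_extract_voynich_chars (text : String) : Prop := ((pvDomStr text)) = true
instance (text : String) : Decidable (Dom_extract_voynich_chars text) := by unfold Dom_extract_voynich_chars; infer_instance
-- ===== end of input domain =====

-- B replaces A's manual index loop with set-membership on slices by a regex tokenizer
-- (digraph alternation, then a single-any-character fallback) run with re.findall; idiomatic, same cost.

-- ===== PORT A =====
-- the set literal {'ch', 'sh', ...}
def pvDigraphs : PySem.Set String :=
  PySem.Set.ofList ["ch", "sh", "ck", "cf", "ct", "cs", "ai", "ee", "ii", "in"]

-- the while-loop; i starts at 0 and only grows, so it is kept as a Nat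
def pvLoopA (cs : List Char) (i : Nat) : List String :=
  if h : i < cs.length then
    if i + 1 < cs.length ∧
        PySem.Set.contains pvDigraphs
          (String.ofList (PySem.List.slice cs (some (i : Int)) (some ((i : Int) + 2)))) = true then
      String.ofList (PySem.List.slice cs (some (i : Int)) (some ((i : Int) + 2))) :: pvLoopA cs (i + 2)
    else
      String.ofList [cs[i]] :: pvLoopA cs (i + 1)
  else []
termination_by cs.length - i

def extract_voynich_chars (text : String) : List String := pvLoopA text.toList 0

-- ===== PORT B =====
-- hand port of the compiled regex r'ch|sh|ck|cf|ct|cs|ai|ee|ii|in|[\s\S]':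
-- the alternatives, in the pattern's order
def pvAlts : List (List Char) :=
  [['c','h'], ['s','h'], ['c','k'], ['c','f'], ['c','t'], ['c','s'],
   ['a','i'], ['e','e'], ['i','i'], ['i','n']]

-- re.findall: repeated leftmost match; at each position the engine tries the
-- alternatives left to right and falls back to [\s\S] (any one character).
-- Exact here because every alternative is a literal (each of length 2, so a
-- match consumes the head plus one more character: rest.tail).
def pvFindAll : List Char → List String
  | [] => []
  | c :: rest =>
    match pvAlts.find? (fun d => d.isPrefixOf (c :: rest)) with
    | some d => String.ofList d :: pvFindAll rest.tail
    | none => String.ofList [c] :: pvFindAll rest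
termination_by cs => cs.length
decreasing_by
  · simp [List.length_tail]
  · simp

def extract_voynich_chars_alt (text : String) : List String := pvFindAll text.toList

-- ===== PRECONDITION & SPEC =====
def Spec_extract_voynich_chars (text : String) (out : List String) : Prop := out = extract_voynich_chars_alt text
instance (text : String) (out : List String) : Decidable (Spec_extract_voynich_chars text out) := by unfold Spec_extract_voynich_chars; infer_instance

-- ===== CLAIM (what is proved, stated in full; the proofs are below) =====
def Claim_equal_extract_voynich_chars : Prop := ∀ (text : String), Dom_extract_voynich_chars text → Spec_extract_voynich_chars text (extract_voynich_chars text)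

-- ===== LEMMAS AND PROOFS =====

-- two-character strings compare equal iff their characters do (used to evaluate
-- both A's set membership and B's alternation tests on an unknown a, b)
lemma pv_str_beq (a b x y : Char) :
    (String.ofList [a,b] == String.ofList [x,y]) = (x == a && (y == b && true)) := by
  rw [Bool.beq_eq_decide_eq]
  simp [String.ofList_inj, Bool.beq_eq_decide_eq, eq_comm]

-- the set literal, evaluated
lemma pvDigraphs_eq : pvDigraphs = [String.ofList ['c','h'], String.ofList ['s','h'],
    String.ofList ['c','k'], String.ofList ['c','f'], String.ofList ['c','t'], String.ofList ['c','s'],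
    String.ofList ['a','i'], String.ofList ['e','e'], String.ofList ['i','i'], String.ofList ['i','n']] := by
  decide

-- the regex alternation on a one-character tail never matches (all alternatives have length 2)
lemma pv_find_single (a : Char) : pvAlts.find? (fun d => d.isPrefixOf [a]) = none := by
  simp [pvAlts, List.find?, List.isPrefixOf]

-- on a tail of length ≥ 2 the alternation matches exactly when the two-character
-- prefix is in A's digraph set, and then it returns that very prefix
lemma pv_find_pair (a b : Char) (v : List Char) :
    pvAlts.find? (fun d => d.isPrefixOf (a :: b :: v)) =
      if PySem.Set.contains pvDigraphs (String.ofList [a, b]) = true then some [a, b] else none := by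
  simp only [pvAlts, pvDigraphs_eq, PySem.Set.contains, List.find?, List.isPrefixOf,
    List.contains_cons, List.contains_nil, pv_str_beq]
  by_cases h0 : ('c' == a && ('h' == b && true)) = true
  · simp only [Bool.and_eq_true, beq_iff_eq] at h0
    obtain ⟨ha, hb, -⟩ := h0
    subst ha; subst hb
    simp
  simp only [Bool.not_eq_true] at h0
  simp only [h0, Bool.false_or]
  by_cases h1 : ('s' == a && ('h' == b && true)) = true
  · simp only [Bool.and_eq_true, beq_iff_eq] at h1
    obtain ⟨ha, hb, -⟩ := h1
    subst ha; subst hb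
    simp
  simp only [Bool.not_eq_true] at h1
  simp only [h1, Bool.false_or]
  by_cases h2 : ('c' == a && ('k' == b && true)) = true
  · simp only [Bool.and_eq_true, beq_iff_eq] at h2
    obtain ⟨ha, hb, -⟩ := h2
    subst ha; subst hb
    simp
  simp only [Bool.not_eq_true] at h2
  simp only [h2, Bool.false_or]
  by_cases h3 : ('c' == a && ('f' == b && true)) = true
  · simp only [Bool.and_eq_true, beq_iff_eq] at h3
    obtain ⟨ha, hb, -⟩ := h3
    subst ha; subst hb
    simp
  simp only [Bool.not_eq_true] at h3
  simp only [h3, Bool.false_or]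
  by_cases h4 : ('c' == a && ('t' == b && true)) = true
  · simp only [Bool.and_eq_true, beq_iff_eq] at h4
    obtain ⟨ha, hb, -⟩ := h4
    subst ha; subst hb
    simp
  simp only [Bool.not_eq_true] at h4
  simp only [h4, Bool.false_or]
  by_cases h5 : ('c' == a && ('s' == b && true)) = true
  · simp only [Bool.and_eq_true, beq_iff_eq] at h5
    obtain ⟨ha, hb, -⟩ := h5
    subst ha; subst hb
    simp
  simp only [Bool.not_eq_true] at h5
  simp only [h5, Bool.false_or]
  by_cases h6 : ('a' == a && ('i' == b && true)) = true
  · simp only [Bool.and_eq_true, beq_iff_eq] at h6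
    obtain ⟨ha, hb, -⟩ := h6
    subst ha; subst hb
    simp
  simp only [Bool.not_eq_true] at h6
  simp only [h6, Bool.false_or]
  by_cases h7 : ('e' == a && ('e' == b && true)) = true
  · simp only [Bool.and_eq_true, beq_iff_eq] at h7
    obtain ⟨ha, hb, -⟩ := h7
    subst ha; subst hb
    simp
  simp only [Bool.not_eq_true] at h7
  simp only [h7, Bool.false_or]
  by_cases h8 : ('i' == a && ('i' == b && true)) = true
  · simp only [Bool.and_eq_true, beq_iff_eq] at h8
    obtain ⟨ha, hb, -⟩ := h8
    subst ha; subst hb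
    simp
  simp only [Bool.not_eq_true] at h8
  simp only [h8, Bool.false_or]
  by_cases h9 : ('i' == a && ('n' == b && true)) = true
  · simp only [Bool.and_eq_true, beq_iff_eq] at h9
    obtain ⟨ha, hb, -⟩ := h9
    subst ha; subst hb
    simp
  simp only [Bool.not_eq_true] at h9
  simp only [h9, Bool.false_or]

  simp

-- the slice text[i:i+2] with one full character of room is the two-element prefix
lemma pv_slice_pair (cs : List Char) (i : Nat) (h : i < cs.length) (h2 : i + 1 < cs.length) :
    PySem.List.slice cs (some (i : Int)) (some ((i : Int) + 2)) = [cs[i], cs[i+1]] := by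
  rw [PySem.List.slice_toNat cs (by omega) (by omega)]
  have h3 : ((i:Int)).toNat = i := by omega
  have h4 : ((i:Int)+2).toNat = i+2 := by omega
  rw [h3, h4, show i + 2 - i = 2 by omega,
    List.drop_eq_getElem_cons h, List.drop_eq_getElem_cons (show i+1 < cs.length by omega)]
  rfl

-- one step of B's scan on a tail of length ≥ 2, phrased through A's set test
lemma pvFindAll_cons2 (a b : Char) (v : List Char) :
    pvFindAll (a :: b :: v) =
      if PySem.Set.contains pvDigraphs (String.ofList [a, b]) = true then
        String.ofList [a, b] :: pvFindAll v
      else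
        String.ofList [a] :: pvFindAll (b :: v) := by
  by_cases hm : String.ofList [a, b] ∈ pvDigraphs
  · simp [pvFindAll, pv_find_pair, hm]
  · simp [pvFindAll, pv_find_pair, hm]

-- one step of B's scan on a one-character tail
lemma pvFindAll_single (a : Char) : pvFindAll [a] = [String.ofList [a]] := by
  simp [pvFindAll, pv_find_single]

-- main invariant: A's loop from position i equals B's scan of the tail from i
lemma pv_loop_eq (cs : List Char) (i : Nat) : pvLoopA cs i = pvFindAll (cs.drop i) := by
  induction i using pvLoopA.induct cs with
  | case1 i h hc ih =>
    obtain ⟨h2, hmem⟩ := hc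
    rw [pvLoopA]
    simp only [h, ↓reduceDIte, h2, hmem, and_self, if_true, ih]
    rw [List.drop_eq_getElem_cons h, List.drop_eq_getElem_cons (show i+1 < cs.length by omega),
      show i+1+1 = i+2 from rfl, pvFindAll_cons2]
    rw [pv_slice_pair cs i h h2] at hmem ⊢
    rw [if_pos hmem]
  | case2 i h hc ih =>
    rw [pvLoopA]
    simp only [h, ↓reduceDIte, if_neg hc, ih]
    by_cases h2 : i + 1 < cs.length
    · have hmem : ¬ PySem.Set.contains pvDigraphs
          (String.ofList (PySem.List.slice cs (some (i : Int)) (some ((i : Int) + 2)))) = true := by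
        intro hm; exact hc ⟨h2, hm⟩
      rw [pv_slice_pair cs i h h2] at hmem
      rw [List.drop_eq_getElem_cons h, List.drop_eq_getElem_cons (show i+1 < cs.length by omega),
        show i+1+1 = i+2 from rfl, pvFindAll_cons2, if_neg hmem,
        ← List.drop_eq_getElem_cons (show i+1 < cs.length by omega)]
    · have hlast : cs.drop (i+1) = [] := List.drop_eq_nil_of_le (by omega)
      rw [List.drop_eq_getElem_cons h, hlast, pvFindAll_single, pvFindAll]
  | case3 i h =>
    rw [pvLoopA]
    simp [h, List.drop_eq_nil_of_le (show cs.length ≤ i by omega), pvFindAll]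

-- ===== VERDICT (by name: the statement is the Claim_ definition above) =====
theorem extract_voynich_chars_spec : Claim_equal_extract_voynich_chars := by
  intro text _
  show _ = _
  simpa using pv_loop_eq text.toList 0
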